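-- pv_equiv track=rewrite | github.com/yeolsim2hajo/Team_hard | wonkyoung/programmers/level 1/[1차]_비밀지도.py | solution
-- ===== SOURCE A (Python) =====
-- def solution(n, arr1, arr2):
--     answer = []
--     for i in range(n):
--         element, num1, num2 = '', arr1[i], arr2[i]
--         for _ in range(n):
--             num1, remain1 = divmod(num1, 2)
--             num2, remain2 = divmod(num2, 2)
--             element = '#' + element if remain1 or remain2 else ' ' + element
--         answer.append(element)
--     return answer
-- ===== SOURCE B (Python) =====
-- def solution(n, arr1, arr2):
--     if n <= 0:
--         return []
--     mask = (1 << n) - 1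
--     table = str.maketrans('10', '# ')
--     return [format((arr1[i] | arr2[i]) & mask, 'b').zfill(n).translate(table)
--             for i in range(n)]
-- ===== Notes on version B (the rewrite author's own statement) =====
-- stated objective: idiomatic
-- what changed: B replaces A's per-bit inner divmod loop (which prepends one character per bit) by masking the OR value to n low bits and formatting it in binary in one step (format(v,'b').zfill(n)) followed by a character translation '1'->'#', '0'->' '.
import Mathlib
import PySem

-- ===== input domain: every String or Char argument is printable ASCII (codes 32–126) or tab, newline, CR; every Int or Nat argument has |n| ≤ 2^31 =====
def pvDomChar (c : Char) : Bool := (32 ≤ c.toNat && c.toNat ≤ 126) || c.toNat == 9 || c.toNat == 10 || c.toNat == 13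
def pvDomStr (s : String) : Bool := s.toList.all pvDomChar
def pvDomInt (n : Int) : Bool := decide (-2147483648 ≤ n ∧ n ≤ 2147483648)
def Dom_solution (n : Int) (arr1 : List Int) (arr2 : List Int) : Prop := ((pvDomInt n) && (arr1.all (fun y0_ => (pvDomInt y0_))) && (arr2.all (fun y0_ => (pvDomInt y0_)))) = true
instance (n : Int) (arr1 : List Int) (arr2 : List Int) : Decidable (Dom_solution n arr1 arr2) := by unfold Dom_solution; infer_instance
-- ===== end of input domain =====

-- B renders each row by formatting (arr1[i] | arr2[i]) masked to n bits in binary and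
-- translating '1'/'0' to '#'/' ', instead of A's per-bit divmod loop (objective: idiomatic).

-- ===== PORT A =====
/-- Port of A. `divmod(num, 2)` is `PySem.Int.floordiv` / `PySem.Int.mod` (the divisor is the
literal 2 ≠ 0, so `divmod` cannot raise); `arr[i]` is `PySem.List.pyGetD` (indices are in range
under `Pre_solution`); the Python string `element` is carried as its `List Char`. -/
def solution (n : Int) (arr1 : List Int) (arr2 : List Int) : List String :=
  (PySem.List.pyRange 0 n 1).foldl
    (fun answer i =>
      let st :=
        (PySem.List.pyRange 0 n 1).foldl
          (fun (s : List Char × Int × Int) _ =>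
            let num1 := PySem.Int.floordiv s.2.1 2
            let remain1 := PySem.Int.mod s.2.1 2
            let num2 := PySem.Int.floordiv s.2.2 2
            let remain2 := PySem.Int.mod s.2.2 2
            (if remain1 ≠ 0 ∨ remain2 ≠ 0 then '#' :: s.1 else ' ' :: s.1, num1, num2))
          (([] : List Char), PySem.List.pyGetD arr1 i 0, PySem.List.pyGetD arr2 i 0)
      answer ++ [String.ofList st.1])
    []

-- ===== PORT B =====
/-- `str.maketrans('10', '# ')` / `.translate`: '1' ↦ '#', '0' ↦ ' ', other chars unchanged. -/
def pvTranslate (c : Char) : Char := if c = '1' then '#' else if c = '0' then ' ' else c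

/-- Port of B. `format(v, 'b')` is `PySem.Int.toBinChars`, `.zfill(n)` is `PySem.Chars.zfill`,
`|`/`&` are `PySem.Int.bor`/`band`, `1 << n` is `(1 : Int) <<< n.toNat` (n > 0 in this branch). -/
def solution_alt (n : Int) (arr1 : List Int) (arr2 : List Int) : List String :=
  if n ≤ 0 then []
  else
    let mask : Int := (1 : Int) <<< n.toNat - 1
    (PySem.List.pyRange 0 n 1).map (fun i =>
      String.ofList
        ((PySem.Chars.zfill
            (PySem.Int.toBinChars
              (PySem.Int.band
                (PySem.Int.bor (PySem.List.pyGetD arr1 i 0) (PySem.List.pyGetD arr2 i 0))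
                mask))
            n).map pvTranslate))

-- ===== PRECONDITION & SPEC =====
/-- For 0 < n Python's A reads `arr1[i]`, `arr2[i]` for every i < n, so it raises IndexError
unless both lists have length ≥ n; for n ≤ 0 the loop body never runs and A returns []. -/
def Pre_solution (n : Int) (arr1 : List Int) (arr2 : List Int) : Prop :=
  (n ≤ (arr1.length : Int) ∧ n ≤ (arr2.length : Int)) ∨ n ≤ 0
instance (n : Int) (arr1 : List Int) (arr2 : List Int) : Decidable (Pre_solution n arr1 arr2) := by
  unfold Pre_solution; infer_instance

def pvWitness_solution : Int × List Int × List Int := (2, ([1, 2], [2, 1]))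

def Spec_solution (n : Int) (arr1 : List Int) (arr2 : List Int) (out : List String) : Prop := out = solution_alt n arr1 arr2
instance (n : Int) (arr1 : List Int) (arr2 : List Int) (out : List String) : Decidable (Spec_solution n arr1 arr2 out) := by unfold Spec_solution; infer_instance

-- ===== CLAIM (what is proved, stated in full; the proofs are below) =====
def Claim_equal_solution : Prop := ∀ (n : Int) (arr1 : List Int) (arr2 : List Int), Dom_solution n arr1 arr2 → Pre_solution n arr1 arr2 → Spec_solution n arr1 arr2 (solution n arr1 arr2)

-- ===== LEMMAS AND PROOFS =====

/-- A's inner loop body as a state transformer. -/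
def pvStep (s : List Char × Int × Int) : List Char × Int × Int :=
  (if PySem.Int.mod s.2.1 2 ≠ 0 ∨ PySem.Int.mod s.2.2 2 ≠ 0 then '#' :: s.1 else ' ' :: s.1,
   PySem.Int.floordiv s.2.1 2, PySem.Int.floordiv s.2.2 2)

/-- A's inner loop, iterated k times. -/
def pvIter : Nat → (List Char × Int × Int) → List Char × Int × Int
  | 0, s => s
  | k + 1, s => pvIter k (pvStep s)

theorem pvBorPN (m n : Nat) :
    PySem.Int.bor (m : Int) (-(n : Int) - 1) = -((n - (n &&& m) : Nat) : Int) - 1 := by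
  unfold PySem.Int.bor
  have h1 : (0:Int) ≤ (m:Int) := by positivity
  have h2 : ¬ (0:Int) ≤ -(n:Int) - 1 := by omega
  rw [if_pos h1, if_neg h2]
  have h3 : (-(-(n:Int) - 1) - 1).toNat = n := by omega
  have h4 : ((m:Int)).toNat = m := by omega
  rw [h3, h4]
theorem pvBorNP (m n : Nat) :
    PySem.Int.bor (-(m : Int) - 1) (n : Int) = -((m - (m &&& n) : Nat) : Int) - 1 := by
  unfold PySem.Int.bor
  have h1 : ¬ (0:Int) ≤ -(m:Int) - 1 := by omega
  have h2 : (0:Int) ≤ (n:Int) := by positivity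
  rw [if_neg h1, if_pos h2]
  have h3 : (-(-(m:Int) - 1) - 1).toNat = m := by omega
  have h4 : ((n:Int)).toNat = n := by omega
  rw [h3, h4]
theorem pvBorNN (m n : Nat) :
    PySem.Int.bor (-(m : Int) - 1) (-(n : Int) - 1) = -((m &&& n : Nat) : Int) - 1 := by
  unfold PySem.Int.bor
  have h1 : ¬ (0:Int) ≤ -(m:Int) - 1 := by omega
  have h2 : ¬ (0:Int) ≤ -(n:Int) - 1 := by omega
  rw [if_neg h1, if_neg h2]
  have h3 : (-(-(m:Int) - 1) - 1).toNat = m := by omega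
  have h4 : (-(-(n:Int) - 1) - 1).toNat = n := by omega
  rw [h3, h4]
theorem pvBandNP (m n : Nat) :
    PySem.Int.band (-(m : Int) - 1) (n : Int) = ((n - (n &&& m) : Nat) : Int) := by
  unfold PySem.Int.band
  have h1 : ¬ (0:Int) ≤ -(m:Int) - 1 := by omega
  have h2 : (0:Int) ≤ (n:Int) := by positivity
  rw [if_neg h1, if_pos h2]
  have h3 : (-(-(m:Int) - 1) - 1).toNat = m := by omega
  have h4 : ((n:Int)).toNat = n := by omega
  rw [h3, h4]
theorem pvOr_div_two (m n : Nat) : (m ||| n) / 2 = m / 2 ||| n / 2 := by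
  apply Nat.eq_of_testBit_eq; intro i; simp [Nat.testBit_div_two, Nat.testBit_or]
theorem pvAnd_div_two (m n : Nat) : (m &&& n) / 2 = m / 2 &&& n / 2 := by
  apply Nat.eq_of_testBit_eq; intro i; simp [Nat.testBit_div_two, Nat.testBit_and]
theorem pvOr_mod_two (m n : Nat) : (m ||| n) % 2 = 1 ↔ m % 2 = 1 ∨ n % 2 = 1 := by
  have h1 : (m ||| n) % 2 = 1 ↔ (m ||| n).testBit 0 = true := by simp [Nat.testBit_zero]
  rw [h1, Nat.testBit_or]; simp [Nat.testBit_zero]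
theorem pvAnd_mod_two (m n : Nat) : (m &&& n) % 2 = 1 ↔ m % 2 = 1 ∧ n % 2 = 1 := by
  have h1 : (m &&& n) % 2 = 1 ↔ (m &&& n).testBit 0 = true := by simp [Nat.testBit_zero]
  rw [h1, Nat.testBit_and]; simp [Nat.testBit_zero]
theorem pvSub_and_div_two (n m : Nat) : (n - (n &&& m)) / 2 = n / 2 - (n / 2 &&& m / 2) := by
  have hle : n &&& m ≤ n := Nat.and_le_left
  have hdle : (n &&& m) / 2 ≤ n / 2 := by rw [pvAnd_div_two]; exact Nat.and_le_left
  have hm := pvAnd_mod_two n m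
  rw [← pvAnd_div_two]; omega
theorem pvSub_and_mod_two (n m : Nat) :
    (n - (n &&& m)) % 2 = 1 ↔ (n % 2 = 1 ∧ ¬ m % 2 = 1) := by
  have hle : n &&& m ≤ n := Nat.and_le_left
  have hdle : (n &&& m) / 2 ≤ n / 2 := by rw [pvAnd_div_two]; exact Nat.and_le_left
  have hm := pvAnd_mod_two n m
  omega
theorem pvMod_natCast' (t : Nat) : PySem.Int.mod (t : Int) 2 = ((t % 2 : Nat) : Int) := by
  exact_mod_cast PySem.Int.mod_natCast t 2
theorem pvDiv_natCast' (t : Nat) : PySem.Int.floordiv (t : Int) 2 = ((t / 2 : Nat) : Int) := by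
  exact_mod_cast PySem.Int.floordiv_natCast t 2
theorem pvMod_neg (t : Nat) : PySem.Int.mod (-(t : Int) - 1) 2 = 1 - ((t % 2 : Nat) : Int) := by
  rw [PySem.Int.mod_eq_emod_of_pos (by norm_num : (0:Int) < 2)]; omega
theorem pvDiv_neg (t : Nat) : PySem.Int.floordiv (-(t : Int) - 1) 2 = -((t / 2 : Nat) : Int) - 1 := by
  rw [PySem.Int.floordiv_eq_iff_of_pos (by norm_num : (0:Int) < 2)]
  constructor <;> push_cast <;> omega

theorem pvBor_div_two (a b : Int) :
    PySem.Int.floordiv (PySem.Int.bor a b) 2 =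
      PySem.Int.bor (PySem.Int.floordiv a 2) (PySem.Int.floordiv b 2) := by
  rcases le_or_gt 0 a with ha | ha <;> rcases le_or_gt 0 b with hb | hb
  · obtain ⟨m, rfl⟩ := Int.eq_ofNat_of_zero_le ha
    obtain ⟨n, rfl⟩ := Int.eq_ofNat_of_zero_le hb
    rw [PySem.Int.bor_natCast, pvDiv_natCast', pvDiv_natCast', pvDiv_natCast',
      PySem.Int.bor_natCast, pvOr_div_two]
  · obtain ⟨m, rfl⟩ := Int.eq_ofNat_of_zero_le ha
    obtain ⟨n, rfl⟩ : ∃ t : Nat, b = -(t : Int) - 1 := ⟨(-b - 1).toNat, by omega⟩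
    rw [pvBorPN, pvDiv_neg, pvDiv_natCast', pvDiv_neg, pvBorPN, pvSub_and_div_two]
  · obtain ⟨m, rfl⟩ : ∃ t : Nat, a = -(t : Int) - 1 := ⟨(-a - 1).toNat, by omega⟩
    obtain ⟨n, rfl⟩ := Int.eq_ofNat_of_zero_le hb
    rw [pvBorNP, pvDiv_neg, pvDiv_neg, pvDiv_natCast', pvBorNP, pvSub_and_div_two]
  · obtain ⟨m, rfl⟩ : ∃ t : Nat, a = -(t : Int) - 1 := ⟨(-a - 1).toNat, by omega⟩
    obtain ⟨n, rfl⟩ : ∃ t : Nat, b = -(t : Int) - 1 := ⟨(-b - 1).toNat, by omega⟩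
    rw [pvBorNN, pvDiv_neg, pvDiv_neg, pvDiv_neg, pvBorNN, pvAnd_div_two]

theorem pvBor_mod_two (a b : Int) :
    PySem.Int.mod (PySem.Int.bor a b) 2 =
      if PySem.Int.mod a 2 = 0 ∧ PySem.Int.mod b 2 = 0 then 0 else 1 := by
  rcases le_or_gt 0 a with ha | ha <;> rcases le_or_gt 0 b with hb | hb
  · obtain ⟨m, rfl⟩ := Int.eq_ofNat_of_zero_le ha
    obtain ⟨n, rfl⟩ := Int.eq_ofNat_of_zero_le hb
    rw [PySem.Int.bor_natCast, pvMod_natCast', pvMod_natCast', pvMod_natCast']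
    have h := pvOr_mod_two m n
    split_ifs with hc <;> omega
  · obtain ⟨m, rfl⟩ := Int.eq_ofNat_of_zero_le ha
    obtain ⟨n, rfl⟩ : ∃ t : Nat, b = -(t : Int) - 1 := ⟨(-b - 1).toNat, by omega⟩
    rw [pvBorPN, pvMod_neg, pvMod_natCast', pvMod_neg]
    have h := pvSub_and_mod_two n m
    split_ifs with hc <;> omega
  · obtain ⟨m, rfl⟩ : ∃ t : Nat, a = -(t : Int) - 1 := ⟨(-a - 1).toNat, by omega⟩
    obtain ⟨n, rfl⟩ := Int.eq_ofNat_of_zero_le hb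
    rw [pvBorNP, pvMod_neg, pvMod_neg, pvMod_natCast']
    have h := pvSub_and_mod_two m n
    split_ifs with hc <;> omega
  · obtain ⟨m, rfl⟩ : ∃ t : Nat, a = -(t : Int) - 1 := ⟨(-a - 1).toNat, by omega⟩
    obtain ⟨n, rfl⟩ : ∃ t : Nat, b = -(t : Int) - 1 := ⟨(-b - 1).toNat, by omega⟩
    rw [pvBorNN, pvMod_neg, pvMod_neg, pvMod_neg]
    have h := pvAnd_mod_two m n
    split_ifs with hc <;> omega
theorem pvCastPow (k : Nat) : (((2 ^ k - 1 : Nat)) : Int) = (2 : Int) ^ k - 1 := by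
  have h : 1 ≤ 2 ^ k := Nat.one_le_two_pow
  push_cast [h]
  ring

theorem pvNegMod (t : Nat) (k : Nat) :
    (-(t : Int) - 1) % ((2 : Int) ^ k) = ((2 ^ k - 1 - t % 2 ^ k : Nat) : Int) := by
  have hp : 0 < 2 ^ k := Nat.two_pow_pos k
  have hr : t % 2 ^ k < 2 ^ k := Nat.mod_lt t hp
  have hd := Nat.div_add_mod t (2 ^ k)
  have ht : (t : Int) = ((2 ^ k : Nat) : Int) * ((t / 2 ^ k : Nat) : Int) + ((t % 2 ^ k : Nat) : Int) := by
    exact_mod_cast congrArg (fun x : Nat => (x : Int)) hd.symm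
  have h1 : -(t : Int) - 1 =
      ((2 ^ k - 1 - t % 2 ^ k : Nat) : Int) + (-(((t / 2 ^ k : Nat)) : Int) - 1) * ((2 : Int) ^ k) := by
    have hle : t % 2 ^ k ≤ 2 ^ k - 1 := by omega
    have hc : ((2 ^ k - 1 - t % 2 ^ k : Nat) : Int) = (2 : Int) ^ k - 1 - ((t % 2 ^ k : Nat) : Int) := by
      push_cast [hle, Nat.one_le_two_pow]
      ring
    rw [hc, ht]
    push_cast
    ring
  rw [h1, Int.add_mul_emod_self_right,
    Int.emod_eq_of_lt (by positivity) (by exact_mod_cast (by omega : ((2 ^ k - 1 - t % 2 ^ k : Nat)) < 2 ^ k))]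

theorem pvBand_mask (o : Int) (k : Nat) :
    PySem.Int.band o ((2 : Int) ^ k - 1) = PySem.Int.mod o ((2 : Int) ^ k) := by
  have hp : (0:Int) < 2 ^ k := by positivity
  rw [PySem.Int.mod_eq_emod_of_pos hp, ← pvCastPow]
  rcases le_or_gt 0 o with ho | ho
  · obtain ⟨m, rfl⟩ := Int.eq_ofNat_of_zero_le ho
    rw [PySem.Int.band_natCast, Nat.and_two_pow_sub_one_eq_mod]
    push_cast
    rfl
  · obtain ⟨t, rfl⟩ : ∃ t : Nat, o = -(t : Int) - 1 := ⟨(-o - 1).toNat, by omega⟩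
    rw [pvBandNP, Nat.and_comm, Nat.and_two_pow_sub_one_eq_mod]
    exact (pvNegMod t k).symm
theorem pvMod_pow_nonneg (o : Int) (k : Nat) : 0 ≤ PySem.Int.mod o ((2 : Int) ^ k) := by
  rw [PySem.Int.mod_eq_emod_of_pos (by positivity)]
  exact Int.emod_nonneg o (by positivity)
theorem pvMod_pow_lt (o : Int) (k : Nat) : PySem.Int.mod o ((2 : Int) ^ k) < (2 : Int) ^ k := by
  rw [PySem.Int.mod_eq_emod_of_pos (by positivity)]
  exact Int.emod_lt_of_pos o (by positivity)
theorem pvMod_pow_div_two (o : Int) (k : Nat) :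
    PySem.Int.mod o ((2 : Int) ^ (k + 1)) / 2 =
      PySem.Int.mod (PySem.Int.floordiv o 2) ((2 : Int) ^ k) := by
  have hp : (0:Int) < 2 ^ k := by positivity
  have hp1 : (0:Int) < 2 ^ (k+1) := by positivity
  rw [PySem.Int.mod_eq_emod_of_pos hp1, PySem.Int.mod_eq_emod_of_pos hp,
    PySem.Int.floordiv_eq_ediv_of_pos (by norm_num : (0:Int) < 2)]
  set P : Int := 2 ^ k with hP
  have hpow : (2:Int) ^ (k+1) = P * 2 := by rw [hP]; ring
  rw [hpow]
  set q : Int := o / (P * 2) with hq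
  have h1 : o % (P * 2) = o + (-(P * q)) * 2 := by
    rw [Int.emod_def]; ring
  have h2 : (o % (P * 2)) / 2 = o / 2 + (-(P * q)) := by
    rw [h1, Int.add_mul_ediv_right _ _ (by norm_num : (2:Int) ≠ 0)]
  have hb1 : 0 ≤ o % (P * 2) := Int.emod_nonneg o (by positivity)
  have hb2 : o % (P * 2) < P * 2 := Int.emod_lt_of_pos o (by positivity)
  have hd1 : 0 ≤ (o % (P * 2)) / 2 := Int.ediv_nonneg hb1 (by norm_num)
  have hd2 : (o % (P * 2)) / 2 < P := by
    rw [Int.ediv_lt_iff_lt_mul (by norm_num : (0:Int) < 2)]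
    omega
  have h3 : (o / 2) % P = (o % (P * 2)) / 2 := by
    rw [h2]
    have : o / 2 + -(P * q) = o / 2 + -q * P := by ring
    rw [this, ← Int.add_mul_emod_self_right (o / 2) (-q) P]
    exact Int.emod_eq_of_lt (by omega) (by omega)
  omega
theorem pvToDigitsCore_eq (m : Nat) : ∀ (f : Nat) (acc : List Char), m < f →
    Nat.toDigitsCore 2 f m acc = Nat.toDigits 2 m ++ acc := by
  induction m using Nat.strong_induction_on with
  | _ m ih =>
    intro f acc hf
    match f, hf with
    | f + 1, hf =>
      by_cases h2 : m / 2 = 0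
      · simp [Nat.toDigitsCore, Nat.toDigits, h2]
      · have hm2 : 2 ≤ m := by omega
        have hlt : m / 2 < m := by omega
        rw [show Nat.toDigitsCore 2 (f+1) m acc =
              Nat.toDigitsCore 2 f (m / 2) (Nat.digitChar (m % 2) :: acc) by
            simp [Nat.toDigitsCore, h2]]
        rw [ih (m / 2) hlt f _ (by omega)]
        rw [show Nat.toDigits 2 m =
              Nat.toDigitsCore 2 m (m / 2) [Nat.digitChar (m % 2)] by
            simp [Nat.toDigits, Nat.toDigitsCore, h2]]
        rw [ih (m / 2) hlt m _ (by omega)]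
        simp
theorem pvToDigits_rec (m : Nat) (h : 2 ≤ m) :
    Nat.toDigits 2 m = Nat.toDigits 2 (m / 2) ++ [Nat.digitChar (m % 2)] := by
  have h2 : ¬ m / 2 = 0 := by omega
  rw [show Nat.toDigits 2 m = Nat.toDigitsCore 2 m (m / 2) [Nat.digitChar (m % 2)] by
      simp [Nat.toDigits, Nat.toDigitsCore, h2]]
  rw [pvToDigitsCore_eq (m / 2) m _ (by omega)]
theorem pvToDigits_ne_nil (m : Nat) : Nat.toDigits 2 m ≠ [] := by
  by_cases h : 2 ≤ m
  · rw [pvToDigits_rec m h]; simp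
  · interval_cases m <;> decide
theorem pvToDigits_mem (m : Nat) : ∀ c ∈ Nat.toDigits 2 m, c = '0' ∨ c = '1' := by
  induction m using Nat.strong_induction_on with
  | _ m ih =>
    by_cases h : 2 ≤ m
    · rw [pvToDigits_rec m h]
      intro c hc
      rcases List.mem_append.mp hc with hc | hc
      · exact ih (m / 2) (by omega) c hc
      · have : m % 2 = 0 ∨ m % 2 = 1 := by omega
        rcases List.mem_singleton.mp hc with rfl
        rcases this with h0 | h0 <;> rw [h0] <;> [left; right] <;> rfl
    · interval_cases m <;>
        (intro c hc; simp [Nat.toDigits, Nat.toDigitsCore] at hc; subst hc;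
         first | (left; rfl) | (right; rfl))

def pvBits : Nat → Nat → List Char
  | 0, _ => []
  | k + 1, m => pvBits k (m / 2) ++ [if m % 2 = 1 then '#' else ' ']
theorem pvBits_zero (k : Nat) : pvBits k 0 = List.replicate k ' ' := by
  induction k with
  | zero => rfl
  | succ k ih => simp [pvBits, ih, List.replicate_succ']
theorem pvToBin_natCast (m : Nat) : PySem.Int.toBinChars (m : Int) = Nat.toDigits 2 m := by
  simp [PySem.Int.toBinChars]
theorem pvZfill_cons_append (c : Char) (rest : List Char) (d : Char) (k : Nat)
    (hc : ¬(c = '+' ∨ c = '-')) :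
    PySem.Chars.zfill ((c :: rest) ++ [d]) ((k : Int) + 1) =
      PySem.Chars.zfill (c :: rest) (k : Int) ++ [d] := by
  unfold PySem.Chars.zfill
  by_cases hk : k ≤ rest.length + 1
  · rw [if_pos (by simp; omega), if_pos (by simp; omega)]
  · rw [if_neg (by simp; omega), if_neg (by simp; omega)]
    simp only [List.cons_append]
    rw [if_neg hc, if_neg hc]
    simp only [List.length_nil, List.length_cons, List.length_append, List.cons_append,
      List.append_assoc]
    congr 2
    omega
theorem pvZfill_eq_bits (k : Nat) : ∀ m : Nat, 1 ≤ k → m < 2 ^ k →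
    (PySem.Chars.zfill (PySem.Int.toBinChars (m : Int)) (k : Int)).map pvTranslate = pvBits k m := by
  induction k with
  | zero => intro m h; omega
  | succ k ih =>
    intro m _ hm
    by_cases hk : k = 0
    · subst hk
      interval_cases m <;> decide
    · have hk1 : 1 ≤ k := by omega
      rw [pvToBin_natCast]
      by_cases h2 : 2 ≤ m
      · rw [pvToDigits_rec m h2]
        obtain ⟨c, rest, hL⟩ : ∃ c rest, Nat.toDigits 2 (m / 2) = c :: rest := by
          rcases h : Nat.toDigits 2 (m / 2) with _ | ⟨c, rest⟩
          · exact absurd h (pvToDigits_ne_nil _)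
          · exact ⟨c, rest, rfl⟩
        have hc : ¬(c = '+' ∨ c = '-') := by
          rcases pvToDigits_mem (m / 2) c (by rw [hL]; exact List.mem_cons_self) with h | h <;>
            simp [h]
        rw [hL, show ((k + 1 : Nat) : Int) = (k : Int) + 1 by push_cast; ring,
          pvZfill_cons_append c rest _ k hc, List.map_append, ← hL,
          ← pvToBin_natCast, ih (m / 2) hk1 (by omega)]
        show pvBits k (m / 2) ++ [pvTranslate (Nat.digitChar (m % 2))] = pvBits (k + 1) m
        have : pvTranslate (Nat.digitChar (m % 2)) = if m % 2 = 1 then '#' else ' ' := by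
          have : m % 2 = 0 ∨ m % 2 = 1 := by omega
          rcases this with h0 | h0 <;> rw [h0] <;> rfl
        rw [this]
        rfl
      · -- m < 2 : toDigits is a single digit, zfill pads with k zeros
        have hd : Nat.toDigits 2 m = [Nat.digitChar m] := by
          interval_cases m <;> rfl
        rw [hd]
        unfold PySem.Chars.zfill
        rw [if_neg (by simp; omega)]
        dsimp only
        have hds : ¬(Nat.digitChar m = '+' ∨ Nat.digitChar m = '-') := by
          interval_cases m <;> decide
        rw [if_neg hds]
        simp only [List.length_cons, List.length_nil]
        have hcount : ((k + 1 : Nat) : Int).toNat - (0 + 1) = k := by omega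
        rw [hcount, List.map_append, List.map_replicate]
        show List.replicate k (pvTranslate '0') ++ _ = pvBits (k + 1) m
        have h1 : pvTranslate '0' = ' ' := rfl
        have h2 : pvBits (k + 1) m = pvBits k (m / 2) ++ [if m % 2 = 1 then '#' else ' '] := rfl
        rw [h1, h2, show m / 2 = 0 by omega, pvBits_zero]
        congr 1
        have : m % 2 = m := by omega
        rw [this]
        have hmm : m = 0 ∨ m = 1 := by omega
        rcases hmm with rfl | rfl <;> rfl

/-- The masked value of row i, as a Nat. -/
def pvM (k : Nat) (a b : Int) : Nat := (PySem.Int.mod (PySem.Int.bor a b) ((2 : Int) ^ k)).toNat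

theorem pvM_div_two (k : Nat) (a b : Int) :
    pvM (k + 1) a b / 2 = pvM k (PySem.Int.floordiv a 2) (PySem.Int.floordiv b 2) := by
  unfold pvM
  rw [← pvBor_div_two]
  have h := pvMod_pow_div_two (PySem.Int.bor a b) k
  have h1 := pvMod_pow_nonneg (PySem.Int.bor a b) (k + 1)
  have h2 := pvMod_pow_nonneg (PySem.Int.floordiv (PySem.Int.bor a b) 2) k
  omega

theorem pvM_mod_two (k : Nat) (a b : Int) :
    (pvM (k + 1) a b % 2 = 1) ↔ (PySem.Int.mod a 2 ≠ 0 ∨ PySem.Int.mod b 2 ≠ 0) := by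
  unfold pvM
  have hmm : PySem.Int.mod (PySem.Int.bor a b) ((2:Int) ^ (k+1)) % 2
      = PySem.Int.mod (PySem.Int.bor a b) 2 := by
    rw [PySem.Int.mod_eq_emod_of_pos (by positivity : (0:Int) < 2 ^ (k+1)),
      PySem.Int.mod_eq_emod_of_pos (by norm_num : (0:Int) < 2)]
    exact Int.emod_emod_of_dvd _ (dvd_pow_self 2 (by omega : k + 1 ≠ 0))
  have h := pvBor_mod_two a b
  have h1 := pvMod_pow_nonneg (PySem.Int.bor a b) (k + 1)
  split_ifs at h <;> rw [h] at hmm <;> omega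

theorem pvFoldl_const (l : List Int) (init : List Char × Int × Int) :
    l.foldl (fun s _ => pvStep s) init = pvIter l.length init := by
  induction l generalizing init with
  | nil => rfl
  | cons x t ih => simpa [pvIter] using ih (pvStep init)

/-- Characterization of A's inner loop. -/
theorem pvIter_fst (k : Nat) : ∀ (cs : List Char) (a b : Int),
    (pvIter k (cs, a, b)).1 = pvBits k (pvM k a b) ++ cs := by
  induction k with
  | zero => intro cs a b; simp [pvIter, pvBits]
  | succ k ih =>
    intro cs a b
    have hstep : pvStep (cs, a, b) =
        ((if PySem.Int.mod a 2 ≠ 0 ∨ PySem.Int.mod b 2 ≠ 0 then '#' else ' ') :: cs,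
         PySem.Int.floordiv a 2, PySem.Int.floordiv b 2) := by
      unfold pvStep
      split_ifs <;> rfl
    show (pvIter k (pvStep (cs, a, b))).1 = pvBits (k + 1) (pvM (k + 1) a b) ++ cs
    rw [hstep, ih]
    show _ = (pvBits k (pvM (k + 1) a b / 2) ++ [if pvM (k + 1) a b % 2 = 1 then '#' else ' ']) ++ cs
    rw [pvM_div_two]
    have hch : (if pvM (k + 1) a b % 2 = 1 then '#' else ' ')
        = (if PySem.Int.mod a 2 ≠ 0 ∨ PySem.Int.mod b 2 ≠ 0 then '#' else ' ') := by
      have h := pvM_mod_two k a b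
      split_ifs with h1 h2 <;> tauto
    rw [hch]
    simp

-- ===== VERDICT (by name: the statement is the Claim_ definition above) =====
theorem solution_spec : Claim_equal_solution := by
  intro n arr1 arr2 _ _
  unfold Spec_solution solution solution_alt
  by_cases hn : n ≤ 0
  · rw [if_pos hn, PySem.List.pyRange_one_eq_nil (by omega : n ≤ 0)]
    rfl
  · rw [if_neg hn]
    rw [PySem.List.foldl_append_singleton_eq_map, List.nil_append]
    apply List.map_congr_left
    intro i _
    set a := PySem.List.pyGetD arr1 i 0 with ha
    set b := PySem.List.pyGetD arr2 i 0 with hb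
    set K := n.toNat with hK
    have hKn : (K : Int) = n := by omega
    have hK1 : 1 ≤ K := by omega
    have hfun : (fun (s : List Char × Int × Int) (_ : Int) =>
        let num1 := PySem.Int.floordiv s.2.1 2
        let remain1 := PySem.Int.mod s.2.1 2
        let num2 := PySem.Int.floordiv s.2.2 2
        let remain2 := PySem.Int.mod s.2.2 2
        (if remain1 ≠ 0 ∨ remain2 ≠ 0 then '#' :: s.1 else ' ' :: s.1, num1, num2))
        = (fun (s : List Char × Int × Int) (_ : Int) => pvStep s) := rfl
    rw [hfun, pvFoldl_const, PySem.List.length_pyRange_one]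
    have hlen : (n - 0).toNat = K := by omega
    rw [hlen, pvIter_fst, List.append_nil]
    have hmask : (1 : Int) <<< K - 1 = (2 : Int) ^ K - 1 := by
      simp [Int.shiftLeft_eq]
    rw [hmask, pvBand_mask]
    have hcast : PySem.Int.mod (PySem.Int.bor a b) ((2 : Int) ^ K) = ((pvM K a b : Nat) : Int) := by
      have := pvMod_pow_nonneg (PySem.Int.bor a b) K
      unfold pvM
      omega
    rw [hcast, ← hKn, pvZfill_eq_bits K (pvM K a b) hK1 ?bound]
    case bound =>
      have h1 := pvMod_pow_lt (PySem.Int.bor a b) K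
      have h2 := pvMod_pow_nonneg (PySem.Int.bor a b) K
      unfold pvM
      have hp : ((2 : Int) ^ K) = ((2 ^ K : Nat) : Int) := by push_cast; ring
      omega
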